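-- pv_equiv track=rewrite | github.com/thousfeet/LEAR | CFQ_experiment/model.py | get_candidate_p_idx
-- ===== SOURCE A (Python) =====
-- def get_candidate_p_idx(depth, leaf_length, reduce_span):
--     # If one of the child node has been reduced, the parent node cannot be reduced, otherwise will have overlap
--     candidate_p_idx = []
--     for p_idx in range(leaf_length - depth):
--         p_span = [p_idx, p_idx + depth]
--         IS_CANDIDATE = True
--         for span in reduce_span:
--             if (p_span[0] <= span[0] <= p_span[1]) or (p_span[0] <= span[1] <= p_span[1]):
--                 IS_CANDIDATE = False
--                 break
--         if IS_CANDIDATE is True: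
--             candidate_p_idx.append(p_idx)
--
--     return candidate_p_idx
-- ===== SOURCE B (Python) =====
-- def get_candidate_p_idx(depth, leaf_length, reduce_span):
--     # Interval sweep: each span endpoint s disqualifies p in [s-depth, s];
--     # clip these intervals to [0, n-1], sort by start, and emit the gaps.
--     n = leaf_length - depth
--     if n <= 0:
--         return []
--     blocked = []
--     for span in reduce_span:
--         for s in (span[0], span[1]):
--             if s >= 0 and s - depth <= n - 1 and s - depth <= s:
--                 blocked.append((max(s - depth, 0), min(s, n - 1)))
--     blocked.sort(key=lambda iv: iv[0])
--     res = []
--     p = 0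
--     for lo, hi in blocked:
--         if p < lo:
--             res.extend(range(p, lo))
--         if p < hi + 1:
--             p = hi + 1
--     res.extend(range(p, n))
--     return res
-- ===== Notes on version B (the rewrite author's own statement) =====
-- stated objective: faster
-- what changed: Instead of testing every p_idx against every reduce span (O(N*M)), B turns each span endpoint s into a blocked interval [s-depth, s] clipped to [0, n-1], sorts the intervals by start, and emits the uncovered gaps in one sweep (O(N + M log M)).
-- outside the precondition, e.g. on get_candidate_p_idx(5, 6, [[0]]): A returns [], B raises IndexError
import Mathlib
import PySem

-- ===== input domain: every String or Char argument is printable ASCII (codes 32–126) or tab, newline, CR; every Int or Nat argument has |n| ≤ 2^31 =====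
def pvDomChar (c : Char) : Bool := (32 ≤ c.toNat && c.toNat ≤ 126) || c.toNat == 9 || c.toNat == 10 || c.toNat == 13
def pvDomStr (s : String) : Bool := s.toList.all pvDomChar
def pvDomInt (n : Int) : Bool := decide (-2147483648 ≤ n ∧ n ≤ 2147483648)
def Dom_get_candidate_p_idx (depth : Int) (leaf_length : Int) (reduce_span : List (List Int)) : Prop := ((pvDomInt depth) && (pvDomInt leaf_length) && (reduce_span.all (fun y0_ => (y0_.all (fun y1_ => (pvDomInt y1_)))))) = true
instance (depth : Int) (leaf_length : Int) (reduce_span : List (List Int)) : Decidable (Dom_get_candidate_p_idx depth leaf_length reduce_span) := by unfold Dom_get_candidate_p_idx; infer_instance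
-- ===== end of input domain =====

-- B replaces A's quadratic scan (every p_idx against every reduce span) by clipping each
-- span endpoint into a blocked interval, sorting the intervals by start, and sweeping out
-- the uncovered gaps; objective: faster.


-- ===== PORT A =====
-- inner 'for span in reduce_span: … break' loop; span[0]/span[1] are read with pyGetD
-- default 0, which is exact under Pre_ (every span reached there has length ≥ 2)
def pvA_isCandidate (lo hi : Int) : List (List Int) → Bool
  | [] => true
  | span :: rest =>
    if (lo ≤ PySem.List.pyGetD span 0 0 ∧ PySem.List.pyGetD span 0 0 ≤ hi) ∨
       (lo ≤ PySem.List.pyGetD span 1 0 ∧ PySem.List.pyGetD span 1 0 ≤ hi) then false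
    else pvA_isCandidate lo hi rest

-- p_span = [p_idx, p_idx + depth]; p_span[0] = p_idx, p_span[1] = p_idx + depth
def get_candidate_p_idx (depth : Int) (leaf_length : Int) (reduce_span : List (List Int)) : List Int :=
  (PySem.List.pyRange 0 (leaf_length - depth) 1).foldl
    (fun acc p_idx =>
      if pvA_isCandidate p_idx (p_idx + depth) reduce_span then acc ++ [p_idx] else acc) []

-- ===== PORT B =====
-- the two 'blocked.append' loops of Source B (span[0]/span[1] via pyGetD, exact under Pre_)
def pvB_blocked (depth : Int) (n : Int) (reduce_span : List (List Int)) : List (Int × Int) :=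
  reduce_span.foldl
    (fun acc span =>
      [PySem.List.pyGetD span 0 0, PySem.List.pyGetD span 1 0].foldl
        (fun acc2 s =>
          if 0 ≤ s ∧ s - depth ≤ n - 1 ∧ s - depth ≤ s
          then acc2 ++ [(max (s - depth) 0, min s (n - 1))] else acc2)
        acc)
    []

-- the 'for lo, hi in blocked' sweep plus the final res.extend(range(p, n))
def pvB_sweep (n : Int) : List (Int × Int) → Int → List Int → List Int
  | [], p, res => res ++ PySem.List.pyRange p n 1
  | (lo, hi) :: rest, p, res =>
      pvB_sweep n rest (if p < hi + 1 then hi + 1 else p)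
        (if p < lo then res ++ PySem.List.pyRange p lo 1 else res)

def get_candidate_p_idx_alt (depth : Int) (leaf_length : Int) (reduce_span : List (List Int)) : List Int :=
  let n := leaf_length - depth
  if n ≤ 0 then []
  else
    pvB_sweep n
      (PySem.List.sorted (pvB_blocked depth n reduce_span) (fun iv => iv.1) false) 0 []

-- ===== PRECONDITION & SPEC =====
-- Pre_ excludes the inputs where the p_idx loop runs and some reduce span has fewer than
-- two elements: Python A raises IndexError on almost all of them; on the rest (a span of
-- length 1 whose single element blocks every p_idx, so the break always fires first) A
-- happens to return [] while B's natural endpoint read raises.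
def Pre_get_candidate_p_idx (depth : Int) (leaf_length : Int) (reduce_span : List (List Int)) : Prop :=
  leaf_length - depth ≤ 0 ∨ ∀ span ∈ reduce_span, 2 ≤ span.length
instance (depth : Int) (leaf_length : Int) (reduce_span : List (List Int)) : Decidable (Pre_get_candidate_p_idx depth leaf_length reduce_span) := by unfold Pre_get_candidate_p_idx; infer_instance

def pvWitness_get_candidate_p_idx : Int × Int × List (List Int) := (1, 4, [[0, 0], [2, 3]])

def Spec_get_candidate_p_idx (depth : Int) (leaf_length : Int) (reduce_span : List (List Int)) (out : List Int) : Prop := out = get_candidate_p_idx_alt depth leaf_length reduce_span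
instance (depth : Int) (leaf_length : Int) (reduce_span : List (List Int)) (out : List Int) : Decidable (Spec_get_candidate_p_idx depth leaf_length reduce_span out) := by unfold Spec_get_candidate_p_idx; infer_instance

-- ===== CLAIM (what is proved, stated in full; the proofs are below) =====
def Claim_equal_get_candidate_p_idx : Prop := ∀ (depth : Int) (leaf_length : Int) (reduce_span : List (List Int)), Dom_get_candidate_p_idx depth leaf_length reduce_span → Pre_get_candidate_p_idx depth leaf_length reduce_span → Spec_get_candidate_p_idx depth leaf_length reduce_span (get_candidate_p_idx depth leaf_length reduce_span)

-- ===== LEMMAS AND PROOFS =====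

-- 'is p covered by interval iv'
def pvCovB (x : Int) (iv : Int × Int) : Bool := decide (iv.1 ≤ x ∧ x ≤ iv.2)

-- A's inner loop is a short-circuit 'any'
lemma pvA_isCandidate_eq (lo hi : Int) (spans : List (List Int)) :
    pvA_isCandidate lo hi spans
      = !spans.any (fun span =>
          decide ((lo ≤ PySem.List.pyGetD span 0 0 ∧ PySem.List.pyGetD span 0 0 ≤ hi) ∨
                  (lo ≤ PySem.List.pyGetD span 1 0 ∧ PySem.List.pyGetD span 1 0 ≤ hi))) := by
  induction spans with
  | nil => simp [pvA_isCandidate]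
  | cons span rest ih =>
    simp only [pvA_isCandidate, List.any_cons, Bool.not_or]
    split_ifs with h
    · simp [h]
    · simp [h, ih]

-- B's interval-building loops, flattened
lemma pvB_blocked_eq (depth n : Int) (spans : List (List Int)) :
    pvB_blocked depth n spans
      = spans.flatMap (fun span =>
          ([PySem.List.pyGetD span 0 0, PySem.List.pyGetD span 1 0].filter
              (fun s => decide (0 ≤ s ∧ s - depth ≤ n - 1 ∧ s - depth ≤ s))).map
            (fun s => (max (s - depth) 0, min s (n - 1)))) := by
  simp only [pvB_blocked, PySem.List.foldl_append_ite, PySem.List.foldl_append_eq_flatMap,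
    List.nil_append]

lemma pvB_blocked_bounds (depth n : Int) (hn : ¬ n ≤ 0) (spans : List (List Int)) :
    ∀ iv ∈ pvB_blocked depth n spans, iv.1 ≤ iv.2 ∧ iv.2 ≤ n - 1 := by
  intro iv hiv
  rw [pvB_blocked_eq] at hiv
  simp only [List.mem_flatMap, List.mem_map, List.mem_filter, decide_eq_true_eq] at hiv
  obtain ⟨span, -, s, ⟨-, hs⟩, rfl⟩ := hiv
  constructor <;> · simp only [max_le_iff, le_min_iff, min_le_iff] <;> omega

-- p is covered by some built interval iff some span endpoint blocks it (A's test)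
lemma pvB_cov_iff (depth n p : Int) (hp0 : 0 ≤ p) (hpn : p ≤ n - 1) (spans : List (List Int)) :
    (pvB_blocked depth n spans).any (pvCovB p)
      = spans.any (fun span =>
          decide ((p ≤ PySem.List.pyGetD span 0 0 ∧ PySem.List.pyGetD span 0 0 ≤ p + depth) ∨
                  (p ≤ PySem.List.pyGetD span 1 0 ∧ PySem.List.pyGetD span 1 0 ≤ p + depth))) := by
  rw [pvB_blocked_eq, Bool.eq_iff_iff]
  simp only [ List.any_eq_true, List.mem_flatMap, List.mem_map, List.mem_filter,
    List.mem_cons, List.not_mem_nil, or_false, pvCovB, decide_eq_true_eq]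
  constructor
  · rintro ⟨iv, ⟨span, hspan, s, ⟨hs01, hcond⟩, rfl⟩, hcov⟩
    refine ⟨span, hspan, ?_⟩
    simp only [max_le_iff, le_min_iff] at hcov
    rcases hs01 with rfl | rfl
    · left; omega
    · right; omega
  · rintro ⟨span, hspan, h01⟩
    rcases h01 with h | h
    · exact ⟨_, ⟨span, hspan, PySem.List.pyGetD span 0 0, ⟨Or.inl rfl, by omega⟩, rfl⟩,
        by constructor <;> simp <;> omega⟩
    · exact ⟨_, ⟨span, hspan, PySem.List.pyGetD span 1 0, ⟨Or.inr rfl, by omega⟩, rfl⟩,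
        by constructor <;> simp <;> omega⟩

-- the sweep over start-sorted, clipped intervals emits exactly the uncovered indices
lemma pvB_sweep_eq (n : Int) (ivs : List (Int × Int)) (p : Int) (res : List Int)
    (hord : ivs.Pairwise (fun a b => a.1 ≤ b.1))
    (hbd : ∀ iv ∈ ivs, iv.1 ≤ iv.2 ∧ iv.2 ≤ n - 1) :
    pvB_sweep n ivs p res
      = res ++ (PySem.List.pyRange p n 1).filter (fun x => ivs.all (fun iv => !pvCovB x iv)) := by
  induction ivs generalizing p res with
  | nil => simp [pvB_sweep]
  | cons iv rest ih =>
    obtain ⟨lo, hi⟩ := iv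
    obtain ⟨hlohi, hhin⟩ := hbd _ (List.mem_cons_self)
    have hbd' : ∀ iv ∈ rest, iv.1 ≤ iv.2 ∧ iv.2 ≤ n - 1 :=
      fun iv hiv => hbd iv (List.mem_cons_of_mem _ hiv)
    rw [List.pairwise_cons] at hord
    obtain ⟨hlo_rest, hord'⟩ := hord
    rw [pvB_sweep, ih _ _ hord' hbd']
    by_cases hp : p < lo
    · have hph : p < hi + 1 := by omega
      rw [if_pos hp, if_pos hph]
      rw [PySem.List.pyRange_one_append p lo n (by omega) (by omega),
          PySem.List.pyRange_one_append lo (hi + 1) n (by omega) (by omega)]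
      rw [List.filter_append, List.filter_append]
      have h1 : (PySem.List.pyRange p lo 1).filter
          (fun x => ((lo, hi) :: rest).all (fun iv => !pvCovB x iv)) = PySem.List.pyRange p lo 1 := by
        apply List.filter_eq_self.mpr
        intro x hx
        rw [PySem.List.mem_pyRange_one] at hx
        simp only [List.all_cons, List.all_eq_true, Bool.and_eq_true, Bool.not_eq_true',
          pvCovB, decide_eq_false_iff_not]
        exact ⟨by omega, fun iv hiv => by have := hlo_rest iv hiv; omega⟩
      have h2 : (PySem.List.pyRange lo (hi + 1) 1).filter
          (fun x => ((lo, hi) :: rest).all (fun iv => !pvCovB x iv)) = [] := by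
        apply List.filter_eq_nil_iff.mpr
        intro x hx
        rw [PySem.List.mem_pyRange_one] at hx
        simp only [List.all_cons, Bool.and_eq_true, Bool.not_eq_true', pvCovB,
          decide_eq_false_iff_not]
        intro h; exact absurd ⟨by omega, by omega⟩ h.1
      have h3 : (PySem.List.pyRange (hi + 1) n 1).filter
            (fun x => ((lo, hi) :: rest).all (fun iv => !pvCovB x iv))
          = (PySem.List.pyRange (hi + 1) n 1).filter (fun x => rest.all (fun iv => !pvCovB x iv)) := by
        apply List.filter_congr
        intro x hx
        rw [PySem.List.mem_pyRange_one] at hx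
        rw [Bool.eq_iff_iff]
        simp only [List.all_cons, pvCovB, Bool.and_eq_true,
          Bool.not_eq_true', decide_eq_false_iff_not, List.all_eq_true]
        constructor
        · exact fun h => h.2
        · exact fun h => ⟨by omega, h⟩
      rw [h1, h2, h3]
      simp [List.append_assoc]
    · rw [if_neg hp]
      by_cases hph : p < hi + 1
      · rw [if_pos hph]
        rw [PySem.List.pyRange_one_append p (hi + 1) n (by omega) (by omega), List.filter_append]
        have h2 : (PySem.List.pyRange p (hi + 1) 1).filter
            (fun x => ((lo, hi) :: rest).all (fun iv => !pvCovB x iv)) = [] := by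
          apply List.filter_eq_nil_iff.mpr
          intro x hx
          rw [PySem.List.mem_pyRange_one] at hx
          simp only [List.all_cons, Bool.and_eq_true, Bool.not_eq_true', pvCovB,
            decide_eq_false_iff_not]
          intro h; exact absurd ⟨by omega, by omega⟩ h.1
        have h3 : (PySem.List.pyRange (hi + 1) n 1).filter
              (fun x => ((lo, hi) :: rest).all (fun iv => !pvCovB x iv))
            = (PySem.List.pyRange (hi + 1) n 1).filter (fun x => rest.all (fun iv => !pvCovB x iv)) := by
          apply List.filter_congr
          intro x hx
          rw [PySem.List.mem_pyRange_one] at hx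
          rw [Bool.eq_iff_iff]
          simp only [List.all_cons, pvCovB, Bool.and_eq_true,
            Bool.not_eq_true', decide_eq_false_iff_not, List.all_eq_true]
          constructor
          · exact fun h => h.2
          · exact fun h => ⟨by omega, h⟩
        rw [h2, h3]
        simp
      · rw [if_neg hph]
        congr 1
        apply List.filter_congr
        intro x hx
        rw [PySem.List.mem_pyRange_one] at hx
        rw [Bool.eq_iff_iff]
        simp only [List.all_cons, pvCovB, Bool.and_eq_true,
          Bool.not_eq_true', decide_eq_false_iff_not, List.all_eq_true]
        constructor
        · exact fun h => ⟨by omega, h⟩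
        · exact fun h => h.2

-- ===== VERDICT (by name: the statement is the Claim_ definition above) =====
theorem get_candidate_p_idx_spec : Claim_equal_get_candidate_p_idx := by
  intro depth leaf_length reduce_span _ _
  unfold Spec_get_candidate_p_idx get_candidate_p_idx get_candidate_p_idx_alt
  by_cases hn : leaf_length - depth ≤ 0
  · rw [PySem.List.pyRange_one_eq_nil hn]
    simp [hn]
  · simp only [if_neg hn]
    have hord := PySem.List.sorted_pairwise
      (pvB_blocked depth (leaf_length - depth) reduce_span) (fun iv => iv.1)
    have hbd : ∀ iv ∈ PySem.List.sorted
        (pvB_blocked depth (leaf_length - depth) reduce_span) (fun iv => iv.1) false,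
        iv.1 ≤ iv.2 ∧ iv.2 ≤ (leaf_length - depth) - 1 :=
      fun iv hiv => pvB_blocked_bounds depth (leaf_length - depth) hn reduce_span iv
        ((PySem.List.mem_sorted _ _ _ _).mp hiv)
    rw [pvB_sweep_eq _ _ _ _ hord hbd, List.nil_append,
        PySem.List.foldl_append_if_eq_filter, List.nil_append]
    apply List.filter_congr
    intro x hx
    rw [PySem.List.mem_pyRange_one] at hx
    rw [pvA_isCandidate_eq,
        ← pvB_cov_iff depth (leaf_length - depth) x (by omega) (by omega) reduce_span]
    rw [Bool.eq_iff_iff]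
    simp only [Bool.not_eq_true', List.any_eq_false, List.all_eq_true, pvCovB,
      decide_eq_false_iff_not, Bool.not_eq_true, PySem.List.mem_sorted]
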